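-- pv_equiv track=rewrite | github.com/13ud/Functions-made-in-FoC | num2text.py | num2txt
-- ===== SOURCE A (Python) =====
-- def num2txt(num, k=3):
--     numstr = str(num)
--     txt = ""
--     mismatch = len(numstr) % k
--     if mismatch:
--         numstr = "0" * (k - mismatch) + numstr
--     start = 0
--     for end in range(k, len(numstr)+1, k):
--         txt += chr(int(numstr[start:end]))
--         start = end
--     return txt
-- ===== SOURCE B (Python) =====
-- def num2txt(num, k=3):
--     s = str(num)
--     chars = []
--     end = len(s)
--     while end > 0:
--         start = max(0, end - k)
--         chars.append(chr(int(s[start:end])))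
--         end = start
--     return ''.join(reversed(chars))
-- ===== Notes on version B (the rewrite author's own statement) =====
-- stated objective: simpler
-- what changed: B walks the decimal string right-to-left with an end index and max(0, end-k) chunk starts, so A's padding pass (computing len%k and prepending '0'*(k-mismatch)) and its forward range loop disappear; int() ignoring leading zeros makes the leftmost partial chunk parse to the same value A gets from its zero-padded chunk.
-- outside the precondition, e.g. on num2txt(5, -3): A returns '', B raises ValueError
import Mathlib
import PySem

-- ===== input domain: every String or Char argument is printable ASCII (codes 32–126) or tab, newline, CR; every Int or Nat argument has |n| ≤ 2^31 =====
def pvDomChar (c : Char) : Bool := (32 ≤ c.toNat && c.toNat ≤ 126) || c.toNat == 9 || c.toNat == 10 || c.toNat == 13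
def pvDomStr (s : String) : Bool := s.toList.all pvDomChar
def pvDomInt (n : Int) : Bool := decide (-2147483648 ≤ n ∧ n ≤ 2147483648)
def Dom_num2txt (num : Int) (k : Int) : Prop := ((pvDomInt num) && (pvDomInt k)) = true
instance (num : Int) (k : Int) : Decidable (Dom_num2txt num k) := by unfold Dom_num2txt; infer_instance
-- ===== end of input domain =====

-- B replaces A's pad-then-scan-left-to-right pass by a single right-to-left walk with no padding
-- (objective: simpler — the padding branch and the `%` bookkeeping disappear).

-- ===== PORT A =====
-- chr(n): exact for every valid Unicode scalar value; Pre_ keeps every chunk a valid scalar.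
def pyChr (n : Int) : Char := Char.ofNat n.toNat

def num2txt (num : Int) (k : Int) : String :=
  let numstr0 := PySem.Int.toChars num
  let mismatch := PySem.Int.mod (PySem.List.len numstr0) k
  let numstr := if mismatch ≠ 0 then List.replicate (k - mismatch).toNat '0' ++ numstr0 else numstr0
  let r := (PySem.List.pyRange k (PySem.List.len numstr + 1) k).foldl
    (fun (st : List Char × Int) e =>
      (st.1 ++ [pyChr ((PySem.Int.ofChars? (PySem.List.slice numstr (some st.2) (some e))).getD 0)], e))
    (([] : List Char), 0)
  String.ofList r.1

-- ===== PORT B =====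
-- the while loop of Source B: fuel = len(s) bounds the iteration count (each step lowers `end` by ≥ 1 inside Pre_)
def num2txtAltGo (s : List Char) (k : Int) : Nat → Int → List Char
  | 0, _ => []
  | fuel+1, e =>
    if 0 < e then
      pyChr ((PySem.Int.ofChars? (PySem.List.slice s (some (max 0 (e - k))) (some e))).getD 0)
        :: num2txtAltGo s k fuel (max 0 (e - k))
    else []

def num2txt_alt (num : Int) (k : Int) : String :=
  let s := PySem.Int.toChars num
  let chars := num2txtAltGo s k s.length (PySem.List.len s)
  String.ofList chars.reverse

-- ===== PRECONDITION & SPEC =====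
-- a Unicode scalar value: chr() accepts it and the resulting character is representable as a Lean Char
def pvValidScalar (v : Nat) : Bool := v < 0xD800 || (0xE000 ≤ v && v < 0x110000)

-- every base-B digit of n is a valid scalar (the right-aligned k-digit chunks of str(n) are exactly
-- the base-10^k digits of n); pure input arithmetic, no simulation of either port; the first
-- argument is a digit budget (10 is enough for every num in Dom_num2txt, since 2^31 < 10^10)
def pvChunksOk (B : Nat) : Nat → Nat → Bool
  | 0, n => pvValidScalar n
  | f+1, n => if n < B ∨ B ≤ 1 then pvValidScalar n
              else pvValidScalar (n % B) && pvChunksOk B f (n / B)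

-- Pre_ excludes exactly: k = 0 (A raises ZeroDivisionError); num < 0 (A raises ValueError: some chunk
-- is '-…' or negative); k < 0, where A's '' is the accident of an empty range() and the natural B
-- raises ValueError (int('') on an empty slice); chunks ≥ 0x110000, where both A and B raise
-- ValueError in chr(); and chunks in the surrogate range 0xD800–0xDFFF, where both A and B return a
-- lone-surrogate str that is not representable as a Lean String.
-- the exponent is capped at 10: inside Dom_num2txt num ≤ 2^31 < 10^10, so for any k ≥ 10 the whole
-- number is a single chunk and 10^(min k 10) gives the same chunks as 10^k
def Pre_num2txt (num : Int) (k : Int) : Prop :=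
  0 ≤ num ∧ 1 ≤ k ∧ pvChunksOk (10 ^ (min k.toNat 10)) 10 num.toNat = true
instance (num : Int) (k : Int) : Decidable (Pre_num2txt num k) := by unfold Pre_num2txt; infer_instance

def pvWitness_num2txt : Int × Int := (54321, 2)

def Spec_num2txt (num : Int) (k : Int) (out : String) : Prop := out = num2txt_alt num k
instance (num : Int) (k : Int) (out : String) : Decidable (Spec_num2txt num k out) := by unfold Spec_num2txt; infer_instance

-- ===== CLAIM (what is proved, stated in full; the proofs are below) =====
def Claim_equal_num2txt : Prop := ∀ (num : Int) (k : Int), Dom_num2txt num k → Pre_num2txt num k → Spec_num2txt num k (num2txt num k)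

-- ===== LEMMAS AND PROOFS =====

-- the character a chunk contributes (proof-side abbreviation of chr(int(chunk)))
def cchar (c : List Char) : Char := pyChr ((PySem.Int.ofChars? c).getD 0)

-- chunks of s[:e], cut every km1+1 digits counting from the RIGHT end e, in left-to-right order
def rchunks (km1 : Nat) (s : List Char) : Nat → List (List Char)
  | 0 => []
  | (e+1) => rchunks km1 s (e + 1 - (km1+1)) ++ [(s.take (e+1)).drop (e + 1 - (km1+1))]
  termination_by e => e
  decreasing_by omega

-- m chunks of width km1+1 cut from position j leftwards-to-right
def fchunks (km1 : Nat) (p : List Char) : Nat → Nat → List (List Char)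
  | _, 0 => []
  | j, m+1 => ((p.drop j).take (km1+1)) :: fchunks km1 p (j + (km1+1)) m

theorem nospace_digit (c : Char) (h : c.isDigit = true) : PySem.Int.isIntSpace c = false := by
  simp only [PySem.Int.isIntSpace, Bool.or_eq_false_iff, decide_eq_false_iff_not]
  refine ⟨⟨⟨⟨⟨?_,?_⟩,?_⟩,?_⟩,?_⟩,?_⟩ <;> (rintro rfl; simp at h)

theorem dropWhile_all_false {p : Char → Bool} {l : List Char} (h : ∀ c ∈ l, p c = false) :
    List.dropWhile p l = l := by
  cases l with
  | nil => rfl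
  | cons a t => simp [h a (by simp)]

theorem strip_id {l : List Char} (h : ∀ c ∈ l, PySem.Int.isIntSpace c = false) :
    (List.dropWhile PySem.Int.isIntSpace (List.dropWhile PySem.Int.isIntSpace l).reverse).reverse = l := by
  rw [dropWhile_all_false h, dropWhile_all_false (by simpa using h), List.reverse_reverse]

-- int() ignores one leading zero on an all-digit string
theorem ofChars_zero_cons (d : Char) (ds : List Char) (hd : d.isDigit = true)
    (hds : ∀ c ∈ ds, c.isDigit = true) :
    PySem.Int.ofChars? ('0' :: d :: ds) = PySem.Int.ofChars? (d :: ds) := by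
  have hall : ∀ c ∈ ('0' :: d :: ds), PySem.Int.isIntSpace c = false := by
    intro c hc
    apply nospace_digit
    simp at hc
    rcases hc with h|h|h
    · simp [h]
    · simpa [h] using hd
    · exact hds c h
  simp only [PySem.Int.ofChars?]
  rw [strip_id hall, strip_id (fun c hc => hall c (by simp at hc ⊢; tauto))]
  split
  · rename_i heq; simp at heq
  · rename_i heq; simp at heq
  split
  · rename_i heq; cases heq; simp at hd
  · rename_i heq; cases heq; simp at hd
  congr 1
  congr 1
  conv_lhs => whnf
  conv_rhs => whnf
  norm_num
  cases instDecidableEqBool d.isDigit true with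
  | isFalse hf => exact absurd hd hf
  | isTrue ht => rfl

-- int() ignores any number of leading zeros
theorem ofChars_replicate_zero (z : Nat) (d : Char) (ds : List Char) (hd : d.isDigit = true)
    (hds : ∀ c ∈ ds, c.isDigit = true) :
    PySem.Int.ofChars? (List.replicate z '0' ++ d :: ds) = PySem.Int.ofChars? (d :: ds) := by
  induction z with
  | zero => simp
  | succ w ih =>
    have hstep : PySem.Int.ofChars? ('0' :: (List.replicate w '0' ++ d :: ds))
        = PySem.Int.ofChars? (List.replicate w '0' ++ d :: ds) := by
      cases hw : List.replicate w '0' ++ d :: ds with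
      | nil => cases w <;> simp at hw
      | cons c t =>
        have hall : ∀ x ∈ c :: t, x.isDigit = true := by
          rw [← hw]
          intro x hx
          rcases List.mem_append.mp hx with h|h
          · have := List.eq_of_mem_replicate h; subst this; decide
          · rcases List.mem_cons.mp h with h|h
            · subst h; exact hd
            · exact hds x h
        exact ofChars_zero_cons c t (hall c (by simp)) (fun x hx => hall x (by simp [hx]))
    calc PySem.Int.ofChars? (List.replicate (w+1) '0' ++ d :: ds)
        = PySem.Int.ofChars? ('0' :: (List.replicate w '0' ++ d :: ds)) := by
          simp [List.replicate_succ]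
      _ = PySem.Int.ofChars? (List.replicate w '0' ++ d :: ds) := hstep
      _ = PySem.Int.ofChars? (d :: ds) := ih

theorem digitChar_isDigit (m : Nat) (h : m < 10) : (Nat.digitChar m).isDigit = true := by
  interval_cases m <;> decide

theorem toDigitsCore_digits :
    ∀ (f n : Nat) (acc : List Char), (∀ c ∈ acc, c.isDigit = true) →
      ∀ c ∈ Nat.toDigitsCore 10 f n acc, c.isDigit = true := by
  intro f
  induction f with
  | zero => intro n acc hacc; simpa [Nat.toDigitsCore] using hacc
  | succ g ih =>
    intro n acc hacc c hc
    simp only [Nat.toDigitsCore] at hc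
    have hd : ∀ x ∈ ((n % 10).digitChar :: acc), x.isDigit = true := by
      intro x hx
      rcases List.mem_cons.mp hx with h|h
      · subst h; exact digitChar_isDigit _ (Nat.mod_lt _ (by norm_num))
      · exact hacc x h
    by_cases hz : n / 10 = 0
    · rw [if_pos hz] at hc; exact hd c hc
    · rw [if_neg hz] at hc; exact ih (n/10) _ hd c hc

theorem toChars_digits (num : Int) (h : 0 ≤ num) : ∀ c ∈ PySem.Int.toChars num, c.isDigit = true := by
  simp only [PySem.Int.toChars, if_neg (by omega : ¬ num < 0)]
  exact toDigitsCore_digits _ _ [] (by simp)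

theorem toDigitsCore_ne_nil :
    ∀ (f n : Nat) (acc : List Char), (acc ≠ [] ∨ 0 < f) →
      Nat.toDigitsCore 10 f n acc ≠ [] := by
  intro f
  induction f with
  | zero =>
    intro n acc hacc
    simp only [Nat.toDigitsCore]
    rcases hacc with h|h
    · exact h
    · omega
  | succ g ih =>
    intro n acc _
    simp only [Nat.toDigitsCore]
    by_cases hz : n / 10 = 0
    · rw [if_pos hz]; simp
    · rw [if_neg hz]; exact ih (n/10) _ (Or.inl (by simp))

theorem toChars_ne_nil (num : Int) (h : 0 ≤ num) : PySem.Int.toChars num ≠ [] := by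
  simp only [PySem.Int.toChars, if_neg (by omega : ¬ num < 0)]
  exact toDigitsCore_ne_nil _ _ [] (Or.inr (by omega))

theorem pyRange_pos_nil (a b st : Int) (hst : 0 < st) (h : b ≤ a) : PySem.List.pyRange a b st = [] := by
  simp [PySem.List.pyRange, if_pos hst, if_neg (by omega : ¬ a < b)]

theorem pyRange_pos_cons (a b st : Int) (hst : 0 < st) (h : a < b) :
    PySem.List.pyRange a b st = a :: PySem.List.pyRange (a + st) b st := by
  simp only [PySem.List.pyRange, if_neg (by omega : ¬ st = 0), if_pos hst, if_pos h]
  by_cases h2 : a + st < b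
  · rw [if_pos h2]
    have key : ((b - a + st - 1) / st).toNat = ((b - (a + st) + st - 1) / st).toNat + 1 := by
      have e1 : b - a + st - 1 = (b - (a + st) + st - 1) + st := by ring
      have e2 : (b - a + st - 1) / st = (b - (a + st) + st - 1) / st + 1 := by
        rw [e1]
        simpa using Int.add_mul_ediv_right (b - (a + st) + st - 1) 1 (by omega : st ≠ 0)
      have hnn : 0 ≤ (b - (a + st) + st - 1) / st := by
        apply Int.ediv_nonneg <;> omega
      omega
    rw [key, List.range_succ_eq_map]
    simp only [List.map_cons, List.map_map]
    refine List.cons_eq_cons.mpr ⟨by push_cast; ring, ?_⟩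
    apply List.map_congr_left
    intro x _
    simp only [Function.comp_apply]
    push_cast
    ring
  · rw [if_neg h2]
    have key : ((b - a + st - 1) / st).toNat = 1 := by
      have h3 : (b - a - 1) / st = 0 := by
        apply Int.ediv_eq_zero_of_lt (by omega) (by omega)
      have e2 : (b - a + st - 1) / st = (b - a - 1) / st + 1 := by
        rw [(by ring : b - a + st - 1 = (b - a - 1) + st)]
        simpa using Int.add_mul_ediv_right (b - a - 1) 1 (by omega : st ≠ 0)
      omega
    rw [key]
    simp

-- B's loop computes the right-to-left chunk characters (loop order = reverse of left-to-right)
theorem altGo_eq (s : List Char) (km1 : Nat) :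
    ∀ (fuel e : Nat), e ≤ fuel →
      num2txtAltGo s ((km1+1 : Nat) : Int) fuel (e : Int)
        = (List.map cchar (rchunks km1 s e)).reverse := by
  intro fuel
  induction fuel with
  | zero =>
    intro e he
    have : e = 0 := by omega
    subst this
    simp [num2txtAltGo, rchunks]
  | succ g ih =>
    intro e he
    rcases Nat.eq_zero_or_pos e with h0 | hpos
    · subst h0
      simp [num2txtAltGo, rchunks]
    · obtain ⟨e', rfl⟩ : ∃ e', e = e' + 1 := ⟨e - 1, by omega⟩
      have hmax : max 0 ((((e' + 1 : Nat)) : Int) - ((km1+1 : Nat) : Int)) = ((e' + 1 - (km1+1) : Nat) : Int) := by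
        push_cast
        omega
      have hstep : num2txtAltGo s ((km1+1 : Nat) : Int) (g+1) ((e' + 1 : Nat) : Int)
          = pyChr ((PySem.Int.ofChars? (PySem.List.slice s (some ((e' + 1 - (km1+1) : Nat) : Int)) (some ((e' + 1 : Nat) : Int)))).getD 0)
            :: num2txtAltGo s ((km1+1 : Nat) : Int) g ((e' + 1 - (km1+1) : Nat) : Int) := by
        rw [num2txtAltGo, if_pos (by push_cast; omega : (0:Int) < ((e' + 1 : Nat) : Int)), hmax]
      rw [hstep, ih _ (by omega)]
      rw [rchunks]
      simp only [List.map_append, List.map_cons, List.map_nil, List.reverse_append,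
        List.reverse_cons, List.reverse_nil, List.nil_append, List.cons_append]
      congr 1
      unfold cchar
      congr 2
      rw [PySem.List.slice_natCast, List.drop_take]

-- A's fold computes the left-to-right chunk characters of the padded string
theorem foldA_eq (p : List Char) (km1 : Nat) :
    ∀ (m j : Nat) (acc : List Char),
      ((PySem.List.pyRange ((j : Int) + (km1+1 : Nat)) ((j : Int) + (m : Nat) * (km1+1 : Nat) + 1) ((km1+1 : Nat))).foldl
        (fun (st : List Char × Int) e =>
          (st.1 ++ [pyChr ((PySem.Int.ofChars? (PySem.List.slice p (some st.2) (some e))).getD 0)], e))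
        (acc, (j : Int)))
      = (acc ++ List.map cchar (fchunks km1 p j m), ((j + m * (km1+1) : Nat) : Int)) := by
  intro m
  induction m with
  | zero =>
    intro j acc
    rw [pyRange_pos_nil _ _ _ (by push_cast; omega) (by push_cast; omega)]
    simp [fchunks]
  | succ m ih =>
    intro j acc
    have hmul : ((km1:Int)+1) ≤ ((m:Int)+1)*((km1:Int)+1) := by
      nlinarith [Int.natCast_nonneg m, Int.natCast_nonneg km1]
    rw [pyRange_pos_cons _ _ _ (by push_cast; omega) (by push_cast; omega)]
    simp only [List.foldl_cons]
    have harg : ((j : Int) + ((km1+1 : Nat) : Int)) = (((j + (km1+1) : Nat)) : Int) := by push_cast; ring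
    have hslice : PySem.List.slice p (some (j : Int)) (some ((j : Int) + ((km1+1 : Nat) : Int)))
        = (p.drop j).take (km1+1) := by
      rw [PySem.List.slice_natCast_add]
    have hb : ((j : Int) + ((m+1 : Nat) : Int) * ((km1+1 : Nat) : Int) + 1)
        = (((j + (km1+1) : Nat) : Int) + ((m : Nat) : Int) * ((km1+1 : Nat) : Int) + 1) := by
      push_cast; ring
    rw [hslice, harg, hb]
    rw [ih (j + (km1+1)) (acc ++ [pyChr ((PySem.Int.ofChars? ((p.drop j).take (km1+1))).getD 0)])]
    refine Prod.ext ?_ ?_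
    · simp [fchunks, cchar]
    · show (((j + (km1+1) + m * (km1+1) : Nat)) : Int) = ((j + (m+1) * (km1+1) : Nat) : Int)
      push_cast; ring

theorem fchunks_snoc (km1 : Nat) (p : List Char) :
    ∀ (m j : Nat), fchunks km1 p j (m+1) = fchunks km1 p j m ++ [(p.drop (j + m * (km1+1))).take (km1+1)] := by
  intro m
  induction m with
  | zero => intro j; simp [fchunks]
  | succ m ih =>
    intro j
    show fchunks km1 p j (m+2) = _
    rw [show fchunks km1 p j (m+2) = ((p.drop j).take (km1+1)) :: fchunks km1 p (j + (km1+1)) (m+1) from rfl]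
    rw [ih (j + (km1+1))]
    rw [show fchunks km1 p j (m+1) = ((p.drop j).take (km1+1)) :: fchunks km1 p (j + (km1+1)) m from rfl]
    simp only [List.cons_append]
    have h : j + (km1+1) + m * (km1+1) = j + (m+1) * (km1+1) := by ring
    rw [h]

theorem rchunks_eq_fchunks (km1 : Nat) (p : List Char) :
    ∀ (m : Nat), rchunks km1 p (m * (km1+1)) = fchunks km1 p 0 m := by
  intro m
  induction m with
  | zero => simp [rchunks, fchunks]
  | succ m ih =>
    rw [show (m+1) * (km1+1) = (m * (km1+1) + km1) + 1 from by ring]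
    rw [rchunks]
    rw [show (m * (km1+1) + km1) + 1 - (km1+1) = m * (km1+1) from by omega]
    rw [show (m * (km1+1) + km1) + 1 = (m+1) * (km1+1) from by ring]
    rw [ih, fchunks_snoc, List.drop_take,
        show (m+1)*(km1+1) = m*(km1+1) + (km1+1) from by ring]
    congr 2
    rw [Nat.add_sub_cancel_left, Nat.zero_add]

theorem rchunks_pos (km1 : Nat) (s : List Char) (v : Nat) (h : 1 ≤ v) :
    rchunks km1 s v = rchunks km1 s (v - (km1+1)) ++ [(s.take v).drop (v - (km1+1))] := by
  obtain ⟨v', rfl⟩ : ∃ v', v = v' + 1 := ⟨v - 1, by omega⟩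
  rw [rchunks]

-- padding with z zeros (z < k, z + e a multiple of k) does not change any chunk character
theorem rchunks_pad (km1 z : Nat) (s : List Char) (hz : z < km1+1)
    (hds : ∀ c ∈ s, c.isDigit = true) :
    ∀ (e : Nat), 1 ≤ e → e ≤ s.length → (km1+1) ∣ (z + e) →
      List.map cchar (rchunks km1 (List.replicate z '0' ++ s) (z + e))
        = List.map cchar (rchunks km1 s e) := by
  intro e
  induction e using Nat.strong_induction_on with
  | _ e IH =>
    intro he1 helen hdvd
    have htake : (List.replicate z '0' ++ s).take (z + e) = List.replicate z '0' ++ s.take e := by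
      rw [List.take_append]
      simp
    by_cases hbig : km1 + 1 < e
    · -- both sides peel one chunk from the right; the chunks are the same slice of s
      rw [rchunks_pos km1 _ (z+e) (by omega), rchunks_pos km1 s e (by omega)]
      have hze : z + e - (km1+1) = z + (e - (km1+1)) := by omega
      have hchunk : ((List.replicate z '0' ++ s).take (z + e)).drop (z + e - (km1+1))
          = (s.take e).drop (e - (km1+1)) := by
        rw [htake, hze, List.drop_append]
        simp
      rw [hchunk]
      simp only [List.map_append]
      congr 1
      rw [hze]
      exact IH (e - (km1+1)) (by omega) (by omega) (by omega)
        (by obtain ⟨c, hc⟩ := hdvd; exact ⟨c - 1, by rw [Nat.mul_sub]; omega⟩)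
    · -- the last step: z + e = km1 + 1 exactly, and the padded chunk parses like the bare one
      have hK : z + e = km1 + 1 := by
        obtain ⟨c, hc⟩ := hdvd
        rcases Nat.lt_or_ge c 2 with hc2 | hc2
        · interval_cases c <;> omega
        · exfalso
          have h2 : (km1+1) * 2 ≤ (km1+1) * c := Nat.mul_le_mul_left _ hc2
          omega
      rw [rchunks_pos km1 _ (z+e) (by omega), rchunks_pos km1 s e (by omega)]
      rw [show z + e - (km1+1) = 0 from by omega, show e - (km1+1) = 0 from by omega]
      rw [show rchunks km1 (List.replicate z '0' ++ s) 0 = ([] : List (List Char)) from by rw [rchunks],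
          show rchunks km1 s 0 = ([] : List (List Char)) from by rw [rchunks]]
      simp only [List.drop_zero, List.nil_append, List.map_cons, List.map_nil]
      rw [htake]
      have hne : s.take e ≠ [] := by
        have : (s.take e).length = e := by
          rw [List.length_take]
          omega
        intro hnil
        rw [hnil] at this
        simp at this
        omega
      obtain ⟨d, ds, hcons⟩ := List.exists_cons_of_ne_nil hne
      have hdig : ∀ c ∈ s.take e, c.isDigit = true := fun c hc => hds c (List.take_subset _ _ hc)
      have hparse : PySem.Int.ofChars? (List.replicate z '0' ++ s.take e) = PySem.Int.ofChars? (s.take e) := by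
        rw [hcons]
        exact ofChars_replicate_zero z d ds (hdig d (by rw [hcons]; simp))
          (fun c hc => hdig c (by rw [hcons]; simp [hc]))
      simp [cchar, hparse]

-- ===== VERDICT (by name: the statement is the Claim_ definition above) =====
theorem num2txt_spec : Claim_equal_num2txt := by
  intro num k _hdom hpre
  obtain ⟨h0, hk, _hchunks⟩ := hpre
  obtain ⟨km1, rfl⟩ : ∃ km1 : Nat, k = ((km1+1 : Nat) : Int) := ⟨(k-1).toNat, by push_cast; omega⟩
  unfold Spec_num2txt num2txt num2txt_alt
  simp only [PySem.List.len_eq]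
  set s := PySem.Int.toChars num with hs
  set n := s.length with hn
  have hdig := toChars_digits num h0
  have hne := toChars_ne_nil num h0
  have hn1 : 1 ≤ n := List.length_pos_iff.mpr hne
  have hmod : PySem.Int.mod (n : Int) ((km1+1 : Nat) : Int) = ((n % (km1+1) : Nat) : Int) :=
    PySem.Int.mod_natCast n (km1+1)
  rw [hmod]
  -- B side
  have hB : num2txtAltGo s ((km1+1 : Nat) : Int) s.length ((n : Nat) : Int)
      = (List.map cchar (rchunks km1 s n)).reverse := altGo_eq s km1 s.length n (le_rfl)
  rw [hB, List.reverse_reverse]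
  by_cases hm : n % (km1+1) = 0
  · -- no padding branch
    rw [if_neg (by simp [hm])]
    obtain ⟨q, hq⟩ := (Nat.dvd_of_mod_eq_zero hm)
    have hnm : n = q * (km1+1) := by rw [hq]; ring
    have hfold := foldA_eq s km1 q 0 []
    simp only [Nat.cast_zero, zero_add] at hfold
    have hb1 : ((s.length : Nat) : Int) = ((q : Nat) : Int) * (((km1+1) : Nat) : Int) := by
      rw [← hn, hnm]; exact Nat.cast_mul q (km1+1)
    rw [hb1, hfold]
    simp only [List.nil_append]
    rw [← rchunks_eq_fchunks km1 s q, ← hnm]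
  · -- padding branch
    set r := n % (km1+1) with hr
    have hrlt : r < km1+1 := Nat.mod_lt _ (by omega)
    have hr1 : 1 ≤ r := by omega
    set z := (km1+1) - r with hzdef
    have hcond : ((r : Nat) : Int) ≠ 0 := by
      simpa using (by omega : ¬ (r = 0))
    rw [if_pos hcond]
    have hz : (((km1+1 : Nat) : Int) - ((r : Nat) : Int)).toNat = z := by omega
    rw [hz]
    have hplen : (List.replicate z '0' ++ s).length = z + n := by simp [hn]
    rw [hplen]
    have hq := Nat.div_add_mod n (km1+1)
    have hdvd : (km1+1) ∣ (z + n) := ⟨n / (km1+1) + 1, by rw [Nat.mul_add, Nat.mul_one]; omega⟩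
    set m := n / (km1+1) + 1 with hmdef
    have hm' : z + n = m * (km1+1) := by
      rw [hmdef, Nat.add_mul, Nat.one_mul, Nat.mul_comm (n / (km1+1)) (km1+1)]
      omega
    have hfold := foldA_eq (List.replicate z '0' ++ s) km1 m 0 []
    simp only [Nat.cast_zero, zero_add] at hfold
    rw [← hm'] at hfold
    have hb2 : (((z + n) : Nat) : Int) = ((m : Nat) : Int) * (((km1+1) : Nat) : Int) := by
      rw [hm']; exact Nat.cast_mul m (km1+1)
    rw [hb2, hfold]
    simp only [List.nil_append]
    rw [← rchunks_eq_fchunks km1 (List.replicate z '0' ++ s) m, ← hm']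
    exact congrArg String.ofList (rchunks_pad km1 z s (by omega) hdig n hn1 le_rfl hdvd)
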